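-- pv_equiv track=rewrite | github.com/paulklemstine/factor | pyth_research_category.py | apply_word
-- ===== SOURCE A (Python) =====
-- def apply_word(word, m, n, p):
--     """Apply a word (list of matrix indices) to (m,n) mod p."""
--     for mat_idx in word:
--         if mat_idx == 0:  # B1
--             m, n = (2*m - n) % p, m % p
--         elif mat_idx == 1:  # B2
--             m, n = (2*m + n) % p, m % p
--         elif mat_idx == 2:  # B3
--             m, n = (m + 2*n) % p, n % p
--     return (m, n)
-- ===== SOURCE B (Python) =====
-- def apply_word(word, m, n, p):
--     """Apply a word (list of matrix indices) to (m,n) mod p.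
--
--     Accumulates a single 2x2 transition matrix (reduced mod p as it goes)
--     instead of updating the vector at every step; the vector is transformed
--     once at the end, and only if some valid index occurred."""
--     MATS = {0: (2, -1, 1, 0), 1: (2, 1, 1, 0), 2: (1, 2, 0, 1)}
--     a, b, c, d = 1, 0, 0, 1
--     applied = False
--     for idx in word:
--         t = MATS.get(idx)
--         if t is not None:
--             e, f, g, h = t
--             a, b, c, d = (e*a + f*c) % p, (e*b + f*d) % p, (g*a + h*c) % p, (g*b + h*d) % p
--             applied = True
--     if applied:
--         return ((a*m + b*n) % p, (c*m + d*n) % p)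
--     return (m, n)
-- ===== Notes on version B (the rewrite author's own statement) =====
-- stated objective: alternative
-- what changed: B accumulates a single 2x2 transition matrix (reduced mod p) over the word and applies it to (m,n) once at the end, instead of updating the running vector at every step; unknown indices leave the matrix untouched and (m,n) is returned unreduced when no valid index occurs.
import Mathlib
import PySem

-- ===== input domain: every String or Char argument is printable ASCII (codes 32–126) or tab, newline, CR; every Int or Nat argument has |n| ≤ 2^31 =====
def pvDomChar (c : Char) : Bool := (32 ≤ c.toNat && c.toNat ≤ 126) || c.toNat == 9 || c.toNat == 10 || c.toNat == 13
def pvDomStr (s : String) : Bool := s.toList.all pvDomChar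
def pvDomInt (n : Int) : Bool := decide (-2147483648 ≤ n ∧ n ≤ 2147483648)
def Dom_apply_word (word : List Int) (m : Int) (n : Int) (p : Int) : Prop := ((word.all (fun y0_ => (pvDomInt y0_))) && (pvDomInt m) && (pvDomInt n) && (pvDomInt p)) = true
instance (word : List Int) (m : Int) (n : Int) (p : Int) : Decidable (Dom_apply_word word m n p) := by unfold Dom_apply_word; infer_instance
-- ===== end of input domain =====

-- B accumulates one 2x2 transition matrix (reduced mod p) over the word and applies it to
-- (m, n) once at the end, instead of updating the running vector at every step (alternative).

-- ===== PORT A =====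
-- one iteration of A's for-loop: the if/elif chain on mat_idx over the running (m, n)
def pvStepA (p : Int) (mn : Int × Int) (i : Int) : Int × Int :=
  if i = 0 then (PySem.Int.mod (2 * mn.1 - mn.2) p, PySem.Int.mod mn.1 p)
  else if i = 1 then (PySem.Int.mod (2 * mn.1 + mn.2) p, PySem.Int.mod mn.1 p)
  else if i = 2 then (PySem.Int.mod (mn.1 + 2 * mn.2) p, PySem.Int.mod mn.2 p)
  else mn

def apply_word (word : List Int) (m : Int) (n : Int) (p : Int) : Int × Int :=
  word.foldl (pvStepA p) (m, n)

-- ===== PORT B =====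
-- B's MATS dict
def pvMats : PySem.Dict Int (Int × Int × Int × Int) :=
  PySem.Dict.ofList [(0, (2, -1, 1, 0)), (1, (2, 1, 1, 0)), (2, (1, 2, 0, 1))]

-- one iteration of B's for-loop over ((a, b, c, d), applied)
def pvStepB (p : Int) (st : (Int × Int × Int × Int) × Bool) (idx : Int) : (Int × Int × Int × Int) × Bool :=
  match PySem.Dict.get? pvMats idx with
  | some (e, f, g, h) =>
      let (a, b, c, d) := st.1
      ((PySem.Int.mod (e*a + f*c) p, PySem.Int.mod (e*b + f*d) p,
        PySem.Int.mod (g*a + h*c) p, PySem.Int.mod (g*b + h*d) p), true)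
  | none => st

def apply_word_alt (word : List Int) (m : Int) (n : Int) (p : Int) : Int × Int :=
  let st := word.foldl (pvStepB p) ((1, 0, 0, 1), false)
  if st.2 then
    (PySem.Int.mod (st.1.1 * m + st.1.2.1 * n) p, PySem.Int.mod (st.1.2.2.1 * m + st.1.2.2.2 * n) p)
  else (m, n)

-- ===== PRECONDITION & SPEC =====
-- Pre_ excludes exactly the inputs where the Python A raises ZeroDivisionError:
-- p = 0 together with a word containing a valid matrix index (0, 1 or 2).
def Pre_apply_word (word : List Int) (m : Int) (n : Int) (p : Int) : Prop :=
  (∃ i ∈ word, i = 0 ∨ i = 1 ∨ i = 2) → p ≠ 0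

instance (word : List Int) (m : Int) (n : Int) (p : Int) : Decidable (Pre_apply_word word m n p) := by
  unfold Pre_apply_word; infer_instance

def pvWitness_apply_word : List Int × Int × Int × Int := ([0, 1, 2, 7], 5, 3, 11)

def Spec_apply_word (word : List Int) (m : Int) (n : Int) (p : Int) (out : Int × Int) : Prop :=
  out = apply_word_alt word m n p
instance (word : List Int) (m : Int) (n : Int) (p : Int) (out : Int × Int) : Decidable (Spec_apply_word word m n p out) := by unfold Spec_apply_word; infer_instance

-- ===== CLAIM (what is proved, stated in full; the proofs are below) =====
def Claim_equal_apply_word : Prop := ∀ (word : List Int) (m : Int) (n : Int) (p : Int), Dom_apply_word word m n p → Pre_apply_word word m n p → Spec_apply_word word m n p (apply_word word m n p)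

-- ===== LEMMAS AND PROOFS =====

theorem pv_fmod_cong (u v p : Int) (h : p ∣ (u - v)) : Int.fmod u p = Int.fmod v p := by
  obtain ⟨k, hk⟩ := h
  have : u = v + p * k := by linarith
  rw [this, Int.add_mul_fmod_self_left]

theorem pv_dvd_fmod_sub (x p : Int) : p ∣ (Int.fmod x p - x) :=
  ⟨-Int.fdiv x p, by rw [Int.fmod_def]; ring⟩

-- drop inner fmods under a linear combination (valid for every p, including p = 0)
theorem pv_fmod_lin (e f x y p : Int) :
    Int.fmod (e * Int.fmod x p + f * Int.fmod y p) p = Int.fmod (e * x + f * y) p := by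
  apply pv_fmod_cong
  obtain ⟨kx, hx⟩ := pv_dvd_fmod_sub x p
  obtain ⟨ky, hy⟩ := pv_dvd_fmod_sub y p
  refine ⟨e * kx + f * ky, ?_⟩
  have h1 : Int.fmod x p = x + p * kx := by linarith
  have h2 : Int.fmod y p = y + p * ky := by linarith
  rw [h1, h2]; ring

theorem pv_fmod_lin' (e f x y p : Int) :
    Int.fmod (Int.fmod x p * e + Int.fmod y p * f) p = Int.fmod (x * e + y * f) p := by
  calc Int.fmod (Int.fmod x p * e + Int.fmod y p * f) p
      = Int.fmod (e * Int.fmod x p + f * Int.fmod y p) p := by ring_nf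
    _ = Int.fmod (e * x + f * y) p := pv_fmod_lin e f x y p
    _ = Int.fmod (x * e + y * f) p := by ring_nf

theorem pv_fmod_mul (x e p : Int) :
    Int.fmod (Int.fmod x p * e) p = Int.fmod (x * e) p := by
  have := pv_fmod_lin' e 0 x 0 p
  simpa using this

theorem pvMats_get (i : Int) : PySem.Dict.get? pvMats i =
    if i = 0 then some (2, -1, 1, 0) else if i = 1 then some (2, 1, 1, 0)
    else if i = 2 then some (1, 2, 0, 1) else none := by
  have h : pvMats = PySem.Dict.mk [(0, (2, -1, 1, 0)), (1, (2, 1, 1, 0)), (2, (1, 2, 0, 1))] := by decide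
  rw [h]
  simp only [PySem.Dict.get?_mk_cons]
  split_ifs <;> simp_all [PySem.Dict.get?]

-- the loop invariant: A's running vector is B's accumulated matrix applied to (m, n)
def pvInv (m n p : Int) (mn : Int × Int) (st : (Int × Int × Int × Int) × Bool) : Prop :=
  if st.2 then
    mn = (Int.fmod (st.1.1 * m + st.1.2.1 * n) p, Int.fmod (st.1.2.2.1 * m + st.1.2.2.2 * n) p)
  else mn = (m, n) ∧ st.1 = (1, 0, 0, 1)

theorem pvInv_step (m n p : Int) (mn : Int × Int) (st : (Int × Int × Int × Int) × Bool)
    (h : pvInv m n p mn st) (i : Int) :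
    pvInv m n p (pvStepA p mn i) (pvStepB p st i) := by
  obtain ⟨⟨a, b, c, d⟩, ap⟩ := st
  simp only [pvStepB, pvMats_get]
  by_cases h0 : i = 0
  · subst h0
    cases ap
    · obtain ⟨hmn, hq⟩ := h
      simp only [Prod.mk.injEq] at hq
      obtain ⟨ha, hb, hc, hd⟩ := hq
      subst_vars
      simp [pvStepA, pvInv, PySem.Int.mod, Prod.mk.injEq]
      constructor
      · conv_rhs => rw [pv_fmod_lin']
        congr 1; ring
      · conv_rhs => rw [pv_fmod_mul]
        congr 1; ring
    · simp only [pvInv, if_true] at h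
      subst h
      simp [pvStepA, pvInv, PySem.Int.mod, Prod.mk.injEq]
      constructor
      · conv_rhs => rw [pv_fmod_lin']
        conv_lhs => rw [show 2 * Int.fmod (a*m+b*n) p - Int.fmod (c*m+d*n) p
            = 2 * Int.fmod (a*m+b*n) p + (-1) * Int.fmod (c*m+d*n) p from by ring, pv_fmod_lin]
        congr 1; ring
      · conv_rhs => rw [pv_fmod_lin']
  · by_cases h1 : i = 1
    · subst h1
      cases ap
      · obtain ⟨hmn, hq⟩ := h
        simp only [Prod.mk.injEq] at hq
        obtain ⟨ha, hb, hc, hd⟩ := hq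
        subst_vars
        simp [pvStepA, pvInv, PySem.Int.mod, Prod.mk.injEq]
        constructor
        · conv_rhs => rw [pv_fmod_lin']
          congr 1; ring
        · conv_rhs => rw [pv_fmod_mul]
          congr 1; ring
      · simp only [pvInv, if_true] at h
        subst h
        simp [pvStepA, pvInv, PySem.Int.mod, Prod.mk.injEq]
        constructor
        · conv_rhs => rw [pv_fmod_lin']
          apply pv_fmod_cong
          obtain ⟨k, hk⟩ := pv_dvd_fmod_sub (a*m+b*n) p
          exact ⟨2 * k, by linear_combination 2 * hk⟩
        · conv_rhs => rw [pv_fmod_lin']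
    · by_cases h2 : i = 2
      · subst h2
        cases ap
        · obtain ⟨hmn, hq⟩ := h
          simp only [Prod.mk.injEq] at hq
          obtain ⟨ha, hb, hc, hd⟩ := hq
          subst_vars
          simp [pvStepA, pvInv, PySem.Int.mod, Prod.mk.injEq]
          constructor
          · conv_rhs => rw [pv_fmod_lin']
            congr 1; ring
          · conv_rhs => rw [pv_fmod_mul]
            congr 1; ring
        · simp only [pvInv, if_true] at h
          subst h
          simp [pvStepA, pvInv, PySem.Int.mod, Prod.mk.injEq]
          constructor
          · conv_rhs => rw [pv_fmod_lin']
            apply pv_fmod_cong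
            obtain ⟨k, hk⟩ := pv_dvd_fmod_sub (c*m+d*n) p
            exact ⟨2 * k, by linear_combination 2 * hk⟩
          · conv_rhs => rw [pv_fmod_lin']
      · rw [if_neg h0, if_neg h1, if_neg h2]
        simpa [pvStepA, h0, h1, h2] using h

theorem pvInv_foldl (m n p : Int) (word : List Int) (mn : Int × Int)
    (st : (Int × Int × Int × Int) × Bool) (h : pvInv m n p mn st) :
    pvInv m n p (word.foldl (pvStepA p) mn) (word.foldl (pvStepB p) st) := by
  induction word generalizing mn st with
  | nil => exact h
  | cons i t ih => exact ih _ _ (pvInv_step m n p mn st h i)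

-- ===== VERDICT (by name: the statement is the Claim_ definition above) =====
theorem apply_word_spec : Claim_equal_apply_word := by
  intro word m n p _ _
  unfold Spec_apply_word apply_word apply_word_alt
  have h := pvInv_foldl m n p word (m, n) ((1, 0, 0, 1), false) (by simp [pvInv])
  set st := word.foldl (pvStepB p) ((1, 0, 0, 1), false) with hst
  cases hap : st.2 <;> simp only [pvInv, hap, if_true, if_false, Bool.false_eq_true] at h <;>
    simp [hap, PySem.Int.mod]
  · exact h.1
  · exact h
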